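-- pv_equiv track=rewrite | github.com/LuXiaofeng2018/sweSolverPythonGPU | meshBuilder.py | buildPyramid
-- ===== SOURCE A (Python) =====
-- def buildPyramid(meshU, centerX, centerY, radius, height):
--
--     if (radius == 0):
--         meshU[centerY][centerX][0] += height
--         return meshU
--     else:
--         for i in range(centerY - radius, centerY + radius):
--             for j in range(centerX - radius, centerX + radius):
--                 meshU[i][j][0] += height
--         return buildPyramid(meshU, centerX, centerY, radius - 1, height)
-- ===== SOURCE B (Python) =====
-- def buildPyramid(meshU, centerX, centerY, radius, height):
--     # Single pass: a cell of the 2r x 2r region is covered exactly by the rings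
--     # r0..radius (r0 = its Chebyshev-style distance from the center), so add
--     # height*(radius - r0 + 1) once per cell; then the former base case: one
--     # center add.  Mutates meshU in place like the original.
--     for i in range(centerY - radius, centerY + radius):
--         di = max(centerY - i, i - centerY + 1)
--         for j in range(centerX - radius, centerX + radius):
--             r0 = max(di, centerX - j, j - centerX + 1)
--             meshU[i][j][0] += height * (radius - r0 + 1)
--     meshU[centerY][centerX][0] += height
--     return meshU
-- ===== Notes on version B (the rewrite author's own statement) =====
-- stated objective: faster
-- what changed: Replaces the recursion over shrinking rings (each cell touched once per covering ring) by a single pass over the outermost 2r x 2r region that computes each cell's covering-ring count in closed form and adds height*count once, plus the final center add.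
import Mathlib
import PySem

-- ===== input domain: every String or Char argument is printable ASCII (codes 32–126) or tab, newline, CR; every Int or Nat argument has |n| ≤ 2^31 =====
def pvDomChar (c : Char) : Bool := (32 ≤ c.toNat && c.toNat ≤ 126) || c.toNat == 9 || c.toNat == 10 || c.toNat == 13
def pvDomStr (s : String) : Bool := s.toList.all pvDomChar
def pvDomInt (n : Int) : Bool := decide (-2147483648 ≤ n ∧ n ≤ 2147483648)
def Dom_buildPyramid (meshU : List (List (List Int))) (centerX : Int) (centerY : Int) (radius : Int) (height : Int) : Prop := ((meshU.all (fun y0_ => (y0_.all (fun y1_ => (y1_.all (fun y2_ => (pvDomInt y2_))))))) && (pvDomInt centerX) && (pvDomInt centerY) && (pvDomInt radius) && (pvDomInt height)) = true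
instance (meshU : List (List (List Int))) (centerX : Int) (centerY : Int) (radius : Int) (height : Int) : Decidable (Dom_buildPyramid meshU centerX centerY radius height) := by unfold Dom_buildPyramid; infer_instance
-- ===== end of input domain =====

-- B replaces A's recursion over shrinking rings (each cell rewritten once per covering ring,
-- O(radius^3) updates) by a single pass over the outermost 2r x 2r region that adds
-- height * (covering-ring count, in closed form) once per cell, plus the final center add
-- (objective: faster, O(radius^2) updates). Both Pythons mutate meshU in place with the same
-- net effect; the theorems are about the returned value.

-- ===== PORT A =====
-- `m[i] = f(m[i])` with Python index semantics; leaves the list unchanged where Python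
-- would raise IndexError (those inputs are outside Pre_buildPyramid).
def pvModify {α : Type} (xs : List α) (i : Int) (f : α → α) : List α :=
  match PySem.List.pyGet? xs i with
  | some v => (PySem.List.pySet? xs i (f v)).getD xs
  | none => xs

-- the statement `meshU[i][j][0] += height`, exact on Pre_ (Python negative-index semantics)
def pvBump (m : List (List (List Int))) (i j h : Int) : List (List (List Int)) :=
  pvModify m i (fun row => pvModify row j (fun cell => pvModify cell 0 (· + h)))

-- the nested `for i … for j …` body of A
def pvRing (m : List (List (List Int))) (cX cY r h : Int) : List (List (List Int)) :=
  (PySem.List.pyRange (cY - r) (cY + r) 1).foldl (fun acc i =>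
    (PySem.List.pyRange (cX - r) (cX + r) 1).foldl (fun acc2 j => pvBump acc2 i j h) acc) m

-- A's recursion on radius; fuel = radius.toNat (Pre_ requires radius ≥ 0, where they coincide;
-- for radius < 0 Python A recurses forever / raises RecursionError)
def buildPyramidGo (cX cY h : Int) : Nat → List (List (List Int)) → List (List (List Int))
  | 0, m => pvBump m cY cX h
  | Nat.succ n, m => buildPyramidGo cX cY h n (pvRing m cX cY ((n : Int) + 1) h)

def buildPyramid (meshU : List (List (List Int))) (centerX : Int) (centerY : Int) (radius : Int) (height : Int) : List (List (List Int)) :=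
  buildPyramidGo centerX centerY height radius.toNat meshU

-- ===== PORT B =====
-- B-side cell update `meshU[i][j][0] += amt`: resolve the Python index (negative = from the
-- end) and modify in place; exact — unresolvable index / empty cell = IndexError = unchanged
-- here (outside Pre_buildPyramid).
def altCellAdd (amt : Int) : List Int → List Int
  | [] => []
  | v :: t => (v + amt) :: t

def altRowAdd (j amt : Int) (row : List (List Int)) : List (List Int) :=
  match PySem.List.pyIdx? row.length j with
  | none => row
  | some b => row.modify b (altCellAdd amt)

def altAdd (m : List (List (List Int))) (i j amt : Int) : List (List (List Int)) :=
  match PySem.List.pyIdx? m.length i with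
  | none => m
  | some a => m.modify a (altRowAdd j amt)

def buildPyramid_alt (meshU : List (List (List Int))) (centerX : Int) (centerY : Int) (radius : Int) (height : Int) : List (List (List Int)) :=
  let core := (PySem.List.pyRange (centerY - radius) (centerY + radius) 1).foldl (fun m i =>
    let di := max (centerY - i) (i - centerY + 1)
    (PySem.List.pyRange (centerX - radius) (centerX + radius) 1).foldl (fun m2 j =>
      let r0 := max di (max (centerX - j) (j - centerX + 1))
      altAdd m2 i j (height * (radius - r0 + 1))) m) meshU
  altAdd core centerY centerX height

-- ===== PRECONDITION & SPEC =====
-- cell meshU[i][j] exists (Python index semantics) and is nonempty, so `[0] += …` succeeds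
def pvCellOK (m : List (List (List Int))) (i j : Int) : Bool :=
  match PySem.List.pyGet? m i with
  | some row =>
    match PySem.List.pyGet? row j with
    | some cell => !cell.isEmpty
    | none => false
  | none => false

-- exactly the inputs on which Python A returns: radius ≥ 0 (otherwise infinite recursion /
-- RecursionError) and every accessed cell — the center plus the radius-sized rectangle — is valid
def Pre_buildPyramid (meshU : List (List (List Int))) (centerX : Int) (centerY : Int) (radius : Int) (height : Int) : Prop :=
  0 ≤ radius ∧ pvCellOK meshU centerY centerX = true ∧
  ∀ i ∈ PySem.List.pyRange (centerY - radius) (centerY + radius) 1,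
    ∀ j ∈ PySem.List.pyRange (centerX - radius) (centerX + radius) 1,
      pvCellOK meshU i j = true
instance (meshU : List (List (List Int))) (centerX : Int) (centerY : Int) (radius : Int) (height : Int) : Decidable (Pre_buildPyramid meshU centerX centerY radius height) := by unfold Pre_buildPyramid; infer_instance

def pvWitness_buildPyramid : List (List (List Int)) × Int × Int × Int × Int :=
  ([[[0, 0], [0, 0]], [[0, 0], [0, 0]]], 1, 1, 1, 3)

def Spec_buildPyramid (meshU : List (List (List Int))) (centerX : Int) (centerY : Int) (radius : Int) (height : Int) (out : List (List (List Int))) : Prop := out = buildPyramid_alt meshU centerX centerY radius height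
instance (meshU : List (List (List Int))) (centerX : Int) (centerY : Int) (radius : Int) (height : Int) (out : List (List (List Int))) : Decidable (Spec_buildPyramid meshU centerX centerY radius height out) := by unfold Spec_buildPyramid; infer_instance

-- ===== CLAIM (what is proved, stated in full; the proofs are below) =====
def Claim_equal_buildPyramid : Prop := ∀ (meshU : List (List (List Int))) (centerX : Int) (centerY : Int) (radius : Int) (height : Int), Dom_buildPyramid meshU centerX centerY radius height → Pre_buildPyramid meshU centerX centerY radius height → Spec_buildPyramid meshU centerX centerY radius height (buildPyramid meshU centerX centerY radius height)

-- ===== LEMMAS AND PROOFS =====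
theorem pvWitness_ok : Dom_buildPyramid pvWitness_buildPyramid.1 pvWitness_buildPyramid.2.1 pvWitness_buildPyramid.2.2.1 pvWitness_buildPyramid.2.2.2.1 pvWitness_buildPyramid.2.2.2.2 ∧ Pre_buildPyramid pvWitness_buildPyramid.1 pvWitness_buildPyramid.2.1 pvWitness_buildPyramid.2.2.1 pvWitness_buildPyramid.2.2.2.1 pvWitness_buildPyramid.2.2.2.2 := by
  decide

-- pyIdx? only resolves to an in-range physical index
theorem pyIdx?_lt {n : Nat} {i : Int} {k : Nat} (h : PySem.List.pyIdx? n i = some k) : k < n := by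
  unfold PySem.List.pyIdx? at h
  split_ifs at h <;> simp_all <;> omega

-- A's read-set-write update is B's resolve-and-modify update
theorem set_eq_modify {α : Type} (xs : List α) (k : Nat) (f : α → α) (hk : k < xs.length) :
    xs.set k (f xs[k]) = xs.modify k f := by
  apply List.ext_getElem (by simp)
  intro n h1 h2
  simp only [List.getElem_set, List.getElem_modify]
  by_cases e : k = n
  · subst e; simp
  · simp [e]

theorem pvModify_eq_modify {α : Type} (xs : List α) (i : Int) (f : α → α) :
    pvModify xs i f = match PySem.List.pyIdx? xs.length i with
      | none => xs
      | some k => xs.modify k f := by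
  unfold pvModify PySem.List.pyGet? PySem.List.pySet?
  cases h : PySem.List.pyIdx? xs.length i with
  | none => simp
  | some k =>
    have hk := pyIdx?_lt h
    simp [List.getElem?_eq_getElem hk, set_eq_modify xs k f hk]

theorem pvBump_eq_altAdd (m : List (List (List Int))) (i j h : Int) :
    pvBump m i j h = altAdd m i j h := by
  unfold pvBump altAdd altRowAdd
  rw [pvModify_eq_modify]
  cases PySem.List.pyIdx? m.length i with
  | none => rfl
  | some a =>
    simp only []
    congr 1
    funext row
    rw [pvModify_eq_modify]
    cases PySem.List.pyIdx? row.length j with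
    | none => rfl
    | some b =>
      simp only []
      congr 1
      funext cell
      cases cell with
      | nil => simp [pvModify, altCellAdd, PySem.List.pyGet?, PySem.List.pyIdx?]
      | cons v t =>
        simp [pvModify, altCellAdd, PySem.List.pyGet?, PySem.List.pySet?, PySem.List.pyIdx?]

-- modify at two indices commutes when the functions commute pointwise
theorem modify_comm {α : Type} (xs : List α) (k k' : Nat) (f g : α → α)
    (hc : ∀ a, f (g a) = g (f a)) :
    (xs.modify k f).modify k' g = (xs.modify k' g).modify k f := by
  apply List.ext_getElem (by simp)
  intro n h1 h2
  simp only [List.getElem_modify]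
  by_cases e1 : k = n <;> by_cases e2 : k' = n <;> simp [e1, e2, hc]

theorem modify_merge {α : Type} (xs : List α) (k : Nat) (f g : α → α) :
    (xs.modify k f).modify k g = xs.modify k (fun v => g (f v)) := by
  apply List.ext_getElem (by simp)
  intro n h1 h2
  simp only [List.getElem_modify]
  by_cases e : k = n <;> simp [e]

theorem altCellAdd_comm (a b : Int) (c : List Int) :
    altCellAdd a (altCellAdd b c) = altCellAdd b (altCellAdd a c) := by
  cases c <;> simp [altCellAdd] <;> ring

theorem altCellAdd_merge (a b : Int) (c : List Int) :
    altCellAdd b (altCellAdd a c) = altCellAdd (a + b) c := by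
  cases c <;> simp [altCellAdd] <;> ring

theorem altCellAdd_zero (c : List Int) : altCellAdd 0 c = c := by
  cases c <;> simp [altCellAdd]

theorem altRowAdd_comm (j j' a b : Int) (row : List (List Int)) :
    altRowAdd j a (altRowAdd j' b row) = altRowAdd j' b (altRowAdd j a row) := by
  cases h1 : PySem.List.pyIdx? row.length j <;> cases h2 : PySem.List.pyIdx? row.length j' <;>
    simp only [altRowAdd, List.length_modify, h1, h2]
  exact modify_comm _ _ _ _ _ (altCellAdd_comm b a)

theorem altRowAdd_merge (j a b : Int) (row : List (List Int)) :
    altRowAdd j b (altRowAdd j a row) = altRowAdd j (a + b) row := by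
  cases h1 : PySem.List.pyIdx? row.length j <;>
    simp only [altRowAdd, List.length_modify, h1]
  rw [modify_merge]
  congr 1
  funext c
  exact altCellAdd_merge a b c

theorem altRowAdd_zero (j : Int) (row : List (List Int)) : altRowAdd j 0 row = row := by
  unfold altRowAdd
  cases PySem.List.pyIdx? row.length j <;> simp
  have : altCellAdd 0 = id := funext altCellAdd_zero
  simp [this]

theorem altAdd_comm (m : List (List (List Int))) (i j i' j' a b : Int) :
    altAdd (altAdd m i' j' b) i j a = altAdd (altAdd m i j a) i' j' b := by
  cases h1 : PySem.List.pyIdx? m.length i <;> cases h2 : PySem.List.pyIdx? m.length i' <;>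
    simp only [altAdd, List.length_modify, h1, h2]
  exact modify_comm _ _ _ _ _ (fun row => (altRowAdd_comm j j' a b row).symm)

theorem altAdd_merge (m : List (List (List Int))) (i j a b : Int) :
    altAdd (altAdd m i j a) i j b = altAdd m i j (a + b) := by
  cases h1 : PySem.List.pyIdx? m.length i <;>
    simp only [altAdd, List.length_modify, h1]
  rw [modify_merge]
  congr 1
  funext row
  exact altRowAdd_merge j a b row

theorem altAdd_zero (m : List (List (List Int))) (i j : Int) : altAdd m i j 0 = m := by
  unfold altAdd
  cases PySem.List.pyIdx? m.length i <;> simp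
  have : altRowAdd j 0 = id := funext (altRowAdd_zero j)
  simp [this]

-- a pass over a list of cells with a per-cell amount function
def lpPass (A : Int × Int → Int) (L : List (Int × Int)) (m : List (List (List Int))) : List (List (List Int)) :=
  L.foldl (fun acc p => altAdd acc p.1 p.2 (A p)) m

theorem lpPass_nil (A : Int × Int → Int) (m : List (List (List Int))) : lpPass A [] m = m := rfl

theorem lpPass_cons (A : Int × Int → Int) (p : Int × Int) (T : List (Int × Int)) (m : List (List (List Int))) :
    lpPass A (p :: T) m = lpPass A T (altAdd m p.1 p.2 (A p)) := rfl

theorem lpPass_append (A : Int × Int → Int) (L1 L2 : List (Int × Int)) (m : List (List (List Int))) :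
    lpPass A (L1 ++ L2) m = lpPass A L2 (lpPass A L1 m) := by
  simp [lpPass, List.foldl_append]

theorem altAdd_lpPass_comm (A : Int × Int → Int) (L : List (Int × Int)) (m : List (List (List Int))) (i j a : Int) :
    altAdd (lpPass A L m) i j a = lpPass A L (altAdd m i j a) := by
  induction L generalizing m with
  | nil => rfl
  | cons p T ih =>
    rw [lpPass_cons, lpPass_cons, ih, altAdd_comm]

theorem lpPass_merge (A B : Int × Int → Int) (L : List (Int × Int)) (m : List (List (List Int))) :
    lpPass B L (lpPass A L m) = lpPass (fun p => A p + B p) L m := by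
  induction L generalizing m with
  | nil => rfl
  | cons p T ih =>
    rw [lpPass_cons, lpPass_cons, lpPass_cons, altAdd_lpPass_comm, altAdd_merge, ih]

theorem lpPass_congr (A B : Int × Int → Int) (L : List (Int × Int)) (m : List (List (List Int)))
    (h : ∀ p ∈ L, A p = B p) : lpPass A L m = lpPass B L m := by
  induction L generalizing m with
  | nil => rfl
  | cons p T ih =>
    rw [lpPass_cons, lpPass_cons, h p (by simp), ih _ (fun q hq => h q (by simp [hq]))]

theorem lpPass_zero (A : Int × Int → Int) (L : List (Int × Int)) (m : List (List (List Int)))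
    (h : ∀ p ∈ L, A p = 0) : lpPass A L m = m := by
  induction L generalizing m with
  | nil => rfl
  | cons p T ih =>
    rw [lpPass_cons, h p (by simp), altAdd_zero, ih _ (fun q hq => h q (by simp [hq]))]

theorem lpPass_flatMap (A : Int × Int → Int) (L : List Int) (F : Int → List (Int × Int)) (m : List (List (List Int))) :
    lpPass A (L.flatMap F) m = L.foldl (fun acc i => lpPass A (F i) acc) m := by
  induction L generalizing m with
  | nil => rfl
  | cons i T ih =>
    simp only [List.flatMap_cons, List.foldl_cons]
    rw [lpPass_append, ih]

-- cell list of the outermost 2r x 2r region and the per-cell total amount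
def pvCells (cX cY r : Int) : List (Int × Int) :=
  (PySem.List.pyRange (cY - r) (cY + r) 1).flatMap
    (fun i => (PySem.List.pyRange (cX - r) (cX + r) 1).map (fun j => (i, j)))

def pvAmt (cX cY r h : Int) (p : Int × Int) : Int :=
  h * (r - max (max (cY - p.1) (p.1 - cY + 1)) (max (cX - p.2) (p.2 - cX + 1)) + 1)

theorem lpPass_row (A : Int × Int → Int) (i : Int) (cols : List Int) (m : List (List (List Int))) :
    lpPass A (cols.map (fun j => (i, j))) m = cols.foldl (fun acc j => altAdd acc i j (A (i, j))) m := by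
  simp [lpPass, List.foldl_map]

-- A's ring body is the constant-amount pass over the 2r x 2r region
theorem pvRing_eq (m : List (List (List Int))) (cX cY r h : Int) :
    pvRing m cX cY r h = lpPass (fun _ => h) (pvCells cX cY r) m := by
  unfold pvRing pvCells
  rw [lpPass_flatMap]
  apply PySem.List.foldl_congr_mem
  intro acc i _
  rw [lpPass_row]
  apply PySem.List.foldl_congr_mem
  intro acc2 j _
  rw [pvBump_eq_altAdd]

-- growing the rectangle from r = n to r = n+1 is free: pvAmt _ _ n is 0 on the new band
theorem pvCells_extend (cX cY n h : Int) (hn : 0 ≤ n) (m : List (List (List Int))) :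
    lpPass (pvAmt cX cY n h) (pvCells cX cY (n + 1)) m = lpPass (pvAmt cX cY n h) (pvCells cX cY n) m := by
  unfold pvCells
  have hrows : PySem.List.pyRange (cY - (n + 1)) (cY + (n + 1)) 1
      = (cY - (n + 1)) :: (PySem.List.pyRange (cY - n) (cY + n) 1 ++ [cY + n]) := by
    rw [PySem.List.pyRange_one_cons (by omega)]
    congr 1
    rw [show cY - (n + 1) + 1 = cY - n by ring, show cY + (n + 1) = (cY + n) + 1 by ring,
      PySem.List.pyRange_one_succ_right (by omega)]
  have hcols : PySem.List.pyRange (cX - (n + 1)) (cX + (n + 1)) 1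
      = (cX - (n + 1)) :: (PySem.List.pyRange (cX - n) (cX + n) 1 ++ [cX + n]) := by
    rw [PySem.List.pyRange_one_cons (by omega)]
    congr 1
    rw [show cX - (n + 1) + 1 = cX - n by ring, show cX + (n + 1) = (cX + n) + 1 by ring,
      PySem.List.pyRange_one_succ_right (by omega)]
  rw [hrows]
  rw [List.flatMap_cons, List.flatMap_append, lpPass_append, lpPass_append]
  -- top band row: amounts all 0
  rw [lpPass_zero _ _ m (by
    intro p hp
    simp only [List.mem_map, PySem.List.mem_pyRange_one] at hp
    obtain ⟨j, hj, rfl⟩ := hp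
    dsimp only [pvAmt]
    have h0 : (n - max (max (cY - (cY - (n + 1))) (cY - (n + 1) - cY + 1)) (max (cX - j) (j - cX + 1)) + 1) = 0 := by
      omega
    rw [h0, mul_zero])]
  -- bottom band row: amounts all 0
  rw [show List.flatMap (fun i => (PySem.List.pyRange (cX - (n+1)) (cX + (n+1)) 1).map (fun j => (i, j))) [cY + n]
      = (PySem.List.pyRange (cX - (n+1)) (cX + (n+1)) 1).map (fun j => (cY + n, j)) by simp]
  rw [lpPass_zero _ ((PySem.List.pyRange (cX - (n+1)) (cX + (n+1)) 1).map (fun j => (cY + n, j))) _ (by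
    intro p hp
    simp only [List.mem_map, PySem.List.mem_pyRange_one] at hp
    obtain ⟨j, hj, rfl⟩ := hp
    dsimp only [pvAmt]
    have h0 : (n - max (max (cY - (cY + n)) (cY + n - cY + 1)) (max (cX - j) (j - cX + 1)) + 1) = 0 := by
      omega
    rw [h0, mul_zero])]
  -- middle rows: the left and right band columns carry amount 0
  rw [lpPass_flatMap, lpPass_flatMap]
  apply PySem.List.foldl_congr_mem
  intro acc i hi
  rw [PySem.List.mem_pyRange_one] at hi
  rw [hcols]
  simp only [List.map_cons, List.map_append, List.map_nil]
  rw [lpPass_cons, lpPass_append]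
  dsimp only
  have hL : pvAmt cX cY n h (i, cX - (n + 1)) = 0 := by
    dsimp only [pvAmt]
    have h0 : (n - max (max (cY - i) (i - cY + 1)) (max (cX - (cX - (n + 1))) (cX - (n + 1) - cX + 1)) + 1) = 0 := by
      omega
    rw [h0, mul_zero]
  have hR : pvAmt cX cY n h (i, cX + n) = 0 := by
    dsimp only [pvAmt]
    have h0 : (n - max (max (cY - i) (i - cY + 1)) (max (cX - (cX + n)) (cX + n - cX + 1)) + 1) = 0 := by
      omega
    rw [h0, mul_zero]
  rw [hL, altAdd_zero, lpPass_cons]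
  dsimp only
  rw [hR, altAdd_zero, lpPass_nil]

-- A's whole recursion is one closed-form-amount pass plus the center add
theorem buildPyramidGo_eq (cX cY h : Int) (n : Nat) (m : List (List (List Int))) :
    buildPyramidGo cX cY h n m
      = altAdd (lpPass (pvAmt cX cY (n : Int) h) (pvCells cX cY (n : Int)) m) cY cX h := by
  induction n generalizing m with
  | zero =>
    unfold buildPyramidGo pvCells
    simp only [Nat.cast_zero]
    rw [show PySem.List.pyRange (cY - 0) (cY + 0) 1 = [] from PySem.List.pyRange_one_eq_nil (by omega)]
    rw [pvBump_eq_altAdd]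
    rfl
  | succ k ih =>
    rw [buildPyramidGo, ih, pvRing_eq]
    have hext := pvCells_extend cX cY (k : Int) h (by omega)
      (lpPass (fun _ => h) (pvCells cX cY ((k : Int) + 1)) m)
    rw [show ((k : Int) + 1) = (((k + 1 : Nat)) : Int) by push_cast; ring] at hext ⊢
    rw [← hext, lpPass_merge]
    congr 1
    apply lpPass_congr
    intro p _
    unfold pvAmt
    push_cast
    ring

-- B's port in the same normal form
theorem buildPyramid_alt_eq (meshU : List (List (List Int))) (cX cY radius h : Int) :
    buildPyramid_alt meshU cX cY radius h
      = altAdd (lpPass (pvAmt cX cY radius h) (pvCells cX cY radius) meshU) cY cX h := by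
  unfold buildPyramid_alt pvCells
  dsimp only
  rw [lpPass_flatMap]
  congr 1
  apply PySem.List.foldl_congr_mem
  intro acc i _
  rw [lpPass_row]
  dsimp only [pvAmt]

-- ===== VERDICT (by name: the statement is the Claim_ definition above) =====
theorem buildPyramid_spec : Claim_equal_buildPyramid := by
  intro meshU cX cY radius h _ hp
  unfold Spec_buildPyramid buildPyramid
  rw [buildPyramidGo_eq, buildPyramid_alt_eq]
  rw [Int.toNat_of_nonneg hp.1]
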